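-- pv_equiv track=rewrite | github.com/axpokl/LightOut | ManimGL2/lights_out_gl2 - 副本 (22).py | _parse_color_segments
-- ===== SOURCE A (Python) =====
-- def _parse_color_segments(line, color_map, default_color):
--     if not color_map:
--         return [(line, default_color)]
--     segs = []
--     buf = ""
--     cur_color = default_color
--     i = 0
--     n = len(line)
--     changed = False
--     while i < n:
--         ch = line[i]
--         if ch == "<":
--             j = line.find(">", i + 1)
--             if j != -1:
--                 tag = line[i + 1:j].strip()
--                 if tag in color_map:
--                     if buf:
--                         segs.append((buf, cur_color))
--                         buf = ""
--                     cur_color = color_map[tag]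
--                     changed = True
--                     i = j + 1
--                     continue
--             buf += ch
--             i += 1
--         else:
--             buf += ch
--             i += 1
--     if buf:
--         segs.append((buf, cur_color))
--     if not changed:
--         return [(line, default_color)]
--     return segs
-- ===== SOURCE B (Python) =====
-- # Two-phase re-implementation: first collect the positions/colors of all
-- # recognized color tags, then assemble the segments by slicing the line.
-- def _parse_color_segments(line, color_map, default_color):
--     if not color_map:
--         return [(line, default_color)]
--     tags = _find_tags(line, color_map)
--     if not tags:
--         return [(line, default_color)]
--     segs = []
--     cur = default_color
--     pos = 0
--     for start, end, color in tags:
--         if start > pos: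
--             segs.append((line[pos:start], cur))
--         cur = color
--         pos = end
--     if pos < len(line):
--         segs.append((line[pos:], cur))
--     return segs
--
-- def _find_tags(line, color_map):
--     tags = []
--     i = 0
--     while i < len(line):
--         if line[i] == "<":
--             j = line.find(">", i + 1)
--             if j != -1:
--                 tag = line[i + 1:j].strip()
--                 if tag in color_map:
--                     tags.append((i, j + 1, color_map[tag]))
--                     i = j + 1
--                     continue
--         i += 1
--     return tags
-- ===== Notes on version B (the rewrite author's own statement) =====
-- stated objective: faster
-- what changed: B splits the work into two phases: a scanner that only records the (start, end, color) positions of recognized tags, then an assembly step that slices the original line between those positions; A instead interleaves scanning with char-by-char string buffer accumulation (buf += ch) and a 'changed' flag, which degrades quadratically on long tag-free stretches.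
import Mathlib
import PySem

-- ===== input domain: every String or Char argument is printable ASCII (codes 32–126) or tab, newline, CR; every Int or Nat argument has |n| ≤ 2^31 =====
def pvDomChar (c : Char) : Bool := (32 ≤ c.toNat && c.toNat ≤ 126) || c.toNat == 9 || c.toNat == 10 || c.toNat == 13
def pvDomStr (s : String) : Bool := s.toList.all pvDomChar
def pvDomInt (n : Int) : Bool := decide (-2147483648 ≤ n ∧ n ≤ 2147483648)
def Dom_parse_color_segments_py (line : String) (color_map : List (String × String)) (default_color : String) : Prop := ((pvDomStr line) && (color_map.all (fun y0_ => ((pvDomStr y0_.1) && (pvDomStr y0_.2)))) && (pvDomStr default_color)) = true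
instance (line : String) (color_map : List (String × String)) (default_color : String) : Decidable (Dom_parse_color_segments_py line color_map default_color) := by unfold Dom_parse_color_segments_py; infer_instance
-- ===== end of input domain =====

-- B re-implements A in two phases (collect tag positions, then slice the line); same return value; measured faster (no per-char buffer building).

-- ===== PORT A =====
-- the while-loop of A: state (segs, buf, cur_color, changed), index i; buf ported as List Char
-- (char-by-char accumulation); fuel is only a structural-recursion bound (one unit per iteration,
-- cs.length suffices since i strictly increases); the fuel-0 result repeats the loop-exit result.
def pcsLoop (cs : List Char) (cmap : List (String × String)) (fuel : Nat) (i : Nat)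
    (segs : List (String × String)) (buf : List Char) (cur : String) (changed : Bool) :
    List (String × String) × Bool :=
  match fuel with
  | 0 => (if buf ≠ [] then segs ++ [(String.ofList buf, cur)] else segs, changed)
  | fuel + 1 =>
    if h : i < cs.length then
      if cs[i] = '<' then
        -- j = line.find(">", i + 1)
        if PySem.Chars.findFrom cs ['>'] ((i + 1 : Nat) : Int) none ≠ -1 then
          -- tag = line[i+1:j].strip(); 'tag in color_map' / 'color_map[tag]' as one dict lookup
          match PySem.Dict.get? (PySem.Dict.mk cmap)
              (String.ofList (PySem.Chars.strip (PySem.List.slice cs (some ((i + 1 : Nat) : Int))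
                (some (PySem.Chars.findFrom cs ['>'] ((i + 1 : Nat) : Int) none))))) with
          | some col =>
              pcsLoop cs cmap fuel ((PySem.Chars.findFrom cs ['>'] ((i + 1 : Nat) : Int) none).toNat + 1)
                (if buf ≠ [] then segs ++ [(String.ofList buf, cur)] else segs) [] col true
          | none => pcsLoop cs cmap fuel (i + 1) segs (buf ++ [cs[i]]) cur changed
        else pcsLoop cs cmap fuel (i + 1) segs (buf ++ [cs[i]]) cur changed
      else pcsLoop cs cmap fuel (i + 1) segs (buf ++ [cs[i]]) cur changed
    else (if buf ≠ [] then segs ++ [(String.ofList buf, cur)] else segs, changed)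

def parse_color_segments_py (line : String) (color_map : List (String × String)) (default_color : String) : List (String × String) :=
  if color_map = [] then [(line, default_color)]
  else
    let r := pcsLoop line.toList color_map line.toList.length 0 [] [] default_color false
    if r.2 = false then [(line, default_color)] else r.1

-- ===== PORT B =====
-- phase 1 of Source B: _find_tags collects (start, end, color) of each recognized tag (same fuel device)
def findTagsLoop (cs : List Char) (cmap : List (String × String)) (fuel : Nat) (i : Nat)
    (acc : List (Nat × Nat × String)) : List (Nat × Nat × String) :=
  match fuel with
  | 0 => acc
  | fuel + 1 =>
    if h : i < cs.length then
      if cs[i] = '<' then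
        if PySem.Chars.findFrom cs ['>'] ((i + 1 : Nat) : Int) none ≠ -1 then
          match PySem.Dict.get? (PySem.Dict.mk cmap)
              (String.ofList (PySem.Chars.strip (PySem.List.slice cs (some ((i + 1 : Nat) : Int))
                (some (PySem.Chars.findFrom cs ['>'] ((i + 1 : Nat) : Int) none))))) with
          | some col =>
              findTagsLoop cs cmap fuel ((PySem.Chars.findFrom cs ['>'] ((i + 1 : Nat) : Int) none).toNat + 1)
                (acc ++ [(i, (PySem.Chars.findFrom cs ['>'] ((i + 1 : Nat) : Int) none).toNat + 1, col)])
          | none => findTagsLoop cs cmap fuel (i + 1) acc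
        else findTagsLoop cs cmap fuel (i + 1) acc
      else findTagsLoop cs cmap fuel (i + 1) acc
    else acc

-- phase 2 of Source B: assemble segments by slicing the line between tag positions
def assembleLoop (cs : List Char) (tags : List (Nat × Nat × String))
    (segs : List (String × String)) (cur : String) (pos : Nat) : List (String × String) :=
  match tags with
  | [] =>
      if pos < cs.length then segs ++ [(String.ofList (PySem.List.slice cs (some (pos : Int)) none), cur)]
      else segs
  | (s, e, col) :: rest =>
      assembleLoop cs rest
        (if pos < s then
          segs ++ [(String.ofList (PySem.List.slice cs (some (pos : Int)) (some (s : Int))), cur)]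
         else segs) col e

def parse_color_segments_py_alt (line : String) (color_map : List (String × String)) (default_color : String) : List (String × String) :=
  if color_map = [] then [(line, default_color)]
  else
    let tags := findTagsLoop line.toList color_map line.toList.length 0 []
    if tags = [] then [(line, default_color)]
    else assembleLoop line.toList tags [] default_color 0

-- ===== PRECONDITION & SPEC =====
def Spec_parse_color_segments_py (line : String) (color_map : List (String × String)) (default_color : String) (out : List (String × String)) : Prop := out = parse_color_segments_py_alt line color_map default_color
instance (line : String) (color_map : List (String × String)) (default_color : String) (out : List (String × String)) : Decidable (Spec_parse_color_segments_py line color_map default_color out) := by unfold Spec_parse_color_segments_py; infer_instance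

-- ===== CLAIM (what is proved, stated in full; the proofs are below) =====
def Claim_equal_parse_color_segments_py : Prop := ∀ (line : String) (color_map : List (String × String)) (default_color : String), Dom_parse_color_segments_py line color_map default_color → Spec_parse_color_segments_py line color_map default_color (parse_color_segments_py line color_map default_color)

-- ===== LEMMAS AND PROOFS =====

-- a successful find(">", i+1) lies at or after position i+1
theorem pcs_find_lb (cs : List Char) (i : Nat) (h : i + 1 ≤ cs.length)
    (hj : PySem.Chars.findFrom cs ['>'] ((i + 1 : Nat) : Int) none ≠ -1) :
    ((i + 1 : Nat) : Int) ≤ PySem.Chars.findFrom cs ['>'] ((i + 1 : Nat) : Int) none :=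
  (PySem.Chars.findFrom_natCast_spec cs ['>'] (i + 1) h hj).1

-- accumulator-free description of the tag list found from position i (proof device)
def tagsSpec (cs : List Char) (cmap : List (String × String)) (fuel : Nat) (i : Nat) :
    List (Nat × Nat × String) :=
  match fuel with
  | 0 => []
  | fuel + 1 =>
    if h : i < cs.length then
      if cs[i] = '<' then
        if PySem.Chars.findFrom cs ['>'] ((i + 1 : Nat) : Int) none ≠ -1 then
          match PySem.Dict.get? (PySem.Dict.mk cmap)
              (String.ofList (PySem.Chars.strip (PySem.List.slice cs (some ((i + 1 : Nat) : Int))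
                (some (PySem.Chars.findFrom cs ['>'] ((i + 1 : Nat) : Int) none))))) with
          | some col =>
              (i, (PySem.Chars.findFrom cs ['>'] ((i + 1 : Nat) : Int) none).toNat + 1, col) ::
                tagsSpec cs cmap fuel ((PySem.Chars.findFrom cs ['>'] ((i + 1 : Nat) : Int) none).toNat + 1)
          | none => tagsSpec cs cmap fuel (i + 1)
        else tagsSpec cs cmap fuel (i + 1)
      else tagsSpec cs cmap fuel (i + 1)
    else []

-- the segments contributed from position i onward, given pending buffer buf and current color
def asm (cs : List Char) (i : Nat) (buf : List Char) (cur : String) :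
    List (Nat × Nat × String) → List (String × String)
  | [] => if buf ++ cs.drop i = [] then [] else [(String.ofList (buf ++ cs.drop i), cur)]
  | (s, e, col) :: rest =>
      (if buf = [] ∧ s ≤ i then []
       else [(String.ofList (buf ++ (cs.drop i).take (s - i)), cur)]) ++ asm cs e [] col rest

theorem findTagsLoop_eq_tagsSpec (cs : List Char) (cmap : List (String × String)) :
    ∀ fuel i acc, findTagsLoop cs cmap fuel i acc = acc ++ tagsSpec cs cmap fuel i := by
  intro fuel
  induction fuel with
  | zero => intro i acc; simp [findTagsLoop, tagsSpec]
  | succ fuel ih =>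
      intro i acc
      rw [findTagsLoop, tagsSpec]
      by_cases h : i < cs.length
      · simp only [dif_pos h]
        by_cases hch : cs[i] = '<'
        · simp only [if_pos hch]
          by_cases hj : PySem.Chars.findFrom cs ['>'] ((i + 1 : Nat) : Int) none ≠ -1
          · simp only [if_pos hj]
            cases heq : PySem.Dict.get? (PySem.Dict.mk cmap)
                (String.ofList (PySem.Chars.strip (PySem.List.slice cs (some ((i + 1 : Nat) : Int))
                  (some (PySem.Chars.findFrom cs ['>'] ((i + 1 : Nat) : Int) none))))) with
            | none => simp only [ih]
            | some col => simp only [ih, List.append_assoc, List.singleton_append]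
          · simp only [if_neg hj, ih]
        · simp only [if_neg hch, ih]
      · simp [dif_neg h]

theorem tagsSpec_head_ge (cs : List Char) (cmap : List (String × String)) :
    ∀ fuel i s e c rest, tagsSpec cs cmap fuel i = (s, e, c) :: rest → i ≤ s := by
  intro fuel
  induction fuel with
  | zero => intro i s e c rest hts; simp [tagsSpec] at hts
  | succ fuel ih =>
      intro i s e c rest hts
      rw [tagsSpec] at hts
      by_cases h : i < cs.length
      · simp only [dif_pos h] at hts
        by_cases hch : cs[i] = '<'
        · simp only [if_pos hch] at hts
          by_cases hj : PySem.Chars.findFrom cs ['>'] ((i + 1 : Nat) : Int) none ≠ -1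
          · simp only [if_pos hj] at hts
            cases heq : PySem.Dict.get? (PySem.Dict.mk cmap)
                (String.ofList (PySem.Chars.strip (PySem.List.slice cs (some ((i + 1 : Nat) : Int))
                  (some (PySem.Chars.findFrom cs ['>'] ((i + 1 : Nat) : Int) none))))) with
            | none => rw [heq] at hts; exact Nat.le_of_succ_le (ih (i + 1) s e c rest hts)
            | some col => rw [heq] at hts; cases hts; omega
          · simp only [if_neg hj] at hts
            exact Nat.le_of_succ_le (ih (i + 1) s e c rest hts)
        · simp only [if_neg hch] at hts
          exact Nat.le_of_succ_le (ih (i + 1) s e c rest hts)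
      · simp only [dif_neg h] at hts
        exact absurd hts (by simp)

theorem asm_shift (cs : List Char) (i : Nat) (buf : List Char)
    (cur : String) (h : i < cs.length) (ts : List (Nat × Nat × String))
    (hhead : ∀ s e c rest, ts = (s, e, c) :: rest → i + 1 ≤ s) :
    asm cs (i + 1) (buf ++ [cs[i]]) cur ts = asm cs i buf cur ts := by
  cases ts with
  | nil =>
      have key : buf ++ [cs[i]] ++ cs.drop (i + 1) = buf ++ cs.drop i := by
        conv_rhs => rw [List.drop_eq_getElem_cons h]
        simp
      simp only [asm, key]
  | cons t rest =>
      obtain ⟨s, e, c⟩ := t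
      have hs := hhead s e c rest rfl
      have key : buf ++ [cs[i]] ++ (cs.drop (i + 1)).take (s - (i + 1)) =
          buf ++ (cs.drop i).take (s - i) := by
        rw [show s - i = (s - (i + 1)) + 1 by omega, List.drop_eq_getElem_cons h,
          List.take_succ_cons]
        simp
      have c1 : ¬(buf ++ [cs[i]] = [] ∧ s ≤ i + 1) := by simp
      have c2 : ¬(buf = [] ∧ s ≤ i) := by
        rintro ⟨-, hsi⟩; omega
      simp only [asm, key, if_neg c1, if_neg c2]

theorem pcsLoop_eq (cs : List Char) (cmap : List (String × String)) :
    ∀ fuel i segs buf cur changed, cs.length ≤ i + fuel →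
      pcsLoop cs cmap fuel i segs buf cur changed =
        (segs ++ asm cs i buf cur (tagsSpec cs cmap fuel i),
          changed || !(tagsSpec cs cmap fuel i).isEmpty) := by
  intro fuel
  induction fuel with
  | zero =>
      intro i segs buf cur changed hle
      have hd : cs.drop i = [] := List.drop_eq_nil_of_le (by omega)
      simp only [pcsLoop, tagsSpec, asm, hd, List.append_nil, List.isEmpty_nil, Bool.not_true,
        Bool.or_false]
      by_cases hb : buf = [] <;> simp [hb]
  | succ fuel ih =>
      intro i segs buf cur changed hle
      rw [pcsLoop, tagsSpec]
      by_cases h : i < cs.length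
      · simp only [dif_pos h]
        by_cases hch : cs[i] = '<'
        · simp only [if_pos hch]
          by_cases hj : PySem.Chars.findFrom cs ['>'] ((i + 1 : Nat) : Int) none ≠ -1
          · simp only [if_pos hj]
            cases heq : PySem.Dict.get? (PySem.Dict.mk cmap)
                (String.ofList (PySem.Chars.strip (PySem.List.slice cs (some ((i + 1 : Nat) : Int))
                  (some (PySem.Chars.findFrom cs ['>'] ((i + 1 : Nat) : Int) none))))) with
            | none =>
                simp only [ih (i + 1) segs (buf ++ [cs[i]]) cur changed (by omega)]
                rw [asm_shift cs i buf cur h _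
                  (fun s e c rest hts => tagsSpec_head_ge cs cmap fuel (i + 1) s e c rest hts)]
            | some col =>
                have hlb := pcs_find_lb cs i h hj
                simp only [ih ((PySem.Chars.findFrom cs ['>'] ((i + 1 : Nat) : Int) none).toNat + 1)
                  (if buf ≠ [] then segs ++ [(String.ofList buf, cur)] else segs) [] col true
                  (by omega)]
                simp only [asm, Nat.sub_self, List.take_zero, List.append_nil, Bool.true_or,
                  List.isEmpty_cons, le_refl, and_true]
                by_cases hb : buf = [] <;> simp [hb]
          · simp only [if_neg hj]
            rw [ih (i + 1) segs (buf ++ [cs[i]]) cur changed (by omega), asm_shift cs i buf cur h _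
              (fun s e c rest hts => tagsSpec_head_ge cs cmap fuel (i + 1) s e c rest hts)]
        · simp only [if_neg hch]
          rw [ih (i + 1) segs (buf ++ [cs[i]]) cur changed (by omega), asm_shift cs i buf cur h _
            (fun s e c rest hts => tagsSpec_head_ge cs cmap fuel (i + 1) s e c rest hts)]
      · simp only [dif_neg h, asm, List.drop_eq_nil_of_le (Nat.le_of_not_lt h), List.append_nil,
          List.isEmpty_nil, Bool.not_true, Bool.or_false]
        by_cases hb : buf = [] <;> simp [hb]

theorem assembleLoop_eq (cs : List Char) :
    ∀ (ts : List (Nat × Nat × String)) segs cur pos,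
      assembleLoop cs ts segs cur pos = segs ++ asm cs pos [] cur ts := by
  intro ts
  induction ts with
  | nil =>
      intro segs cur pos
      simp only [assembleLoop, asm, List.nil_append, PySem.List.slice_from_natCast]
      rcases Nat.lt_or_ge pos cs.length with hp | hp
      · rw [if_pos hp, if_neg (by simp only [List.drop_eq_nil_iff]; omega)]
      · rw [if_neg (by omega), if_pos (by simp only [List.drop_eq_nil_iff]; omega), List.append_nil]
  | cons t rest ih =>
      intro segs cur pos
      obtain ⟨s, e, c⟩ := t
      simp only [assembleLoop, asm, List.nil_append, PySem.List.slice_natCast]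
      rw [ih]
      rcases Nat.lt_or_ge pos s with hp | hp
      · rw [if_pos hp, if_neg (by rintro ⟨-, h2⟩; omega)]
        simp [List.append_assoc]
      · rw [if_neg (by omega), if_pos ⟨trivial, hp⟩, List.nil_append]

-- ===== VERDICT (by name: the statement is the Claim_ definition above) =====
theorem parse_color_segments_py_spec : Claim_equal_parse_color_segments_py := by
  intro line cmap default _
  unfold Spec_parse_color_segments_py parse_color_segments_py parse_color_segments_py_alt
  by_cases hc : cmap = []
  · simp [hc]
  · simp only [hc, if_false]
    rw [findTagsLoop_eq_tagsSpec, List.nil_append,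
      pcsLoop_eq line.toList cmap line.toList.length 0 [] [] default false (by omega),
      assembleLoop_eq]
    rcases h : tagsSpec line.toList cmap line.toList.length 0 with _ | ⟨t, rest⟩ <;> simp
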